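/- GENERATED by tools/from_farm_form.py from prooffarm-gif/accepted/digest_extensions.2/Proof.lean (a worked proof of the farm's unit `digest_extensions.2`,
   accepted by the verdict) — do not edit. -/
import Gif.Spec.Units.digest_extensions_2
import Gif.Spec.AllSegs

open X86 X86.User Asan ProgX.Base ProgX.Base.Spec Gif.Spec

set_option maxRecDepth 4000
set_option maxHeartbeats 4000000

namespace Gif.Spec.digest_extensions_2

/-- **The counted blocks of an extension list through a footprint of ONE window that lies below the array** (the function's own
stack): the form a walk has behind a callee (`hsame : Mem.SameExcept [w] v.mem s.mem`); `ExtsAt.frame` asks for `EqOn` instead. -/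
theorem seg2_exts_carry {x : Exts} {p c lo hi : Nat} {mem mem' : Mem} (hexts : ExtsAt (some x) p c mem)
    (hsame : Mem.SameExcept [⟨lo, hi⟩] mem mem') (hlt : x.arr + 24 * x.blocks.length < 2 ^ 64) (hhi : hi ≤ x.arr) :
    ExtsAt (some x) p c mem' := by
  refine hexts.frame ?_ ?_
  · intro o ho
    have eo : o = (x.arr, 24 * x.blocks.length) := List.mem_singleton.mp ho
    subst eo
    apply hsame.eqOn
    intro w hw
    have hw_eq := List.mem_singleton.mp hw
    rw [hw_eq]
    right
    exact hhi
  · intro y hy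
    have ey : y = x := (Option.some.inj hy).symm
    subst ey
    exact hlt

/-- **BACK AT THE HEAD OF THE BLOCK LOOP** (10568DH) after round `i`: `At` and the counted blocks at the new state, `r15`, `r14` as
they were, `r12d = i + 1` (`add r12d, 1`): `Head` with the measure `k − 1 < k`. -/
theorem seg2_head_back {H : Heap} {rest : List Obj} {frames : List (Nat × FrameLayout)} {x : Exts} {u₀ e : State} {ret : Word}
    {s : State} {i k : Nat}
    (hat' : digest_extensions.At Gif.L.digest_extensions.at_10568d H rest frames (some x) u₀ e ret s)
    (hexts' : ExtsAt (some x) x.arr x.blocks.length s.mem)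
    (h15 : s.reg .r15 = UInt64.ofNat x.arr) (h14 : s.reg .r14 = UInt64.ofNat x.blocks.length)
    (h12 : s.reg .r12 = Word.ofBV (Word.part .w32 (UInt64.ofNat i) + 1#32))
    (harr : x.arr < 2 ^ 32) (hlen : x.blocks.length < 2 ^ 31) (hlt : i < x.blocks.length)
    (hk : x.blocks.length - i = k) :
    ∃ k' : Nat, k' < k ∧ digest_extensions.Head k' H rest frames (some x) u₀ e ret s := by
  have e12 : (s.reg .r12).toNat = i + 1 := by
    rw [h12, Gif.Spec.cnt32_succ i (by omega), toNat_ofNat_addr (i + 1) (by omega)]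
  refine ⟨k - 1, by omega, hat', x, rfl, ?_, hexts', ?_, ?_, ?_⟩
  · rw [h15]
    exact toNat_ofNat_addr _ (by omega)
  · rw [h14]
    exact toNat_ofNat_addr _ (by omega)
  · rw [e12]
    omega
  · rw [e12]
    omega

end Gif.Spec.digest_extensions_2

/-- Segment 2 of `digest_extensions` (10568DH … 1056F0H, 105689H … 10568DH; gif_driver.c:136-142): ONE ROUND of the block loop, from
`Head k`. `cmp r12d, r14d ; jge` taken (`i ≥ count`): `Done`, nothing stored. Otherwise `i < length`: `rbp = x.arr + 24·i`
(`word_times24`); the checked loads of `Function` (`+ 16`), `ByteCount` (`+ 0`), `Bytes` (`+ 8`) inside the live array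
`(x.arr, 24 · x.cap)`; two `digest_int`, and, `Bytes` not NULL, `digest_bytes(h, bytes, len)` on the owned object `(bytes, len)`;
`i++`: `Head (k − 1)`. The callees write stack only: behind each call THE HUB is `At` at the returned state (`At.carry` over the
callee's footprint inside `[RA − 128, RA − 48)`) and the counted blocks there (`seg2_exts_carry`); the next walk starts from it.
    BLOCKS: 1 the prelude of a segment; where the array is, as numbers; the registers as equations
            2 WALK 1: the test, `&blocks[i]`, the check of `Function`, to the first `digest_int`; the exit arm `Done`
            3 hub 1 (1056B1H); WALK 2: the check of `ByteCount`, to the second `digest_int`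
            4 hub 2 (1056CBH); WALK 3: the check of `Bytes`, the NULL test; NULL: back at the head; else to `digest_bytes` (its pre)
            5 hub 3 (1056EBH); WALK 4: `i++`, back at the head -/
theorem Gif.Spec.Proved.digest_extensions_2_ok : Gif.Spec.digest_extensions_2.Statement := by
  intro Lay hLay μ hμ u₀ hcode h_int h_bytes h_load4 h_load8 H rest frames ex e ret k v hhead
  obtain ⟨hat, x, hx, h_r15, hexts, h_r14, h_r12, hk⟩ := hhead
  subst hx
  -- 1. THE PRELUDE OF A SEGMENT: the entry, the pre; where the array is (numbers, one inequality per hypothesis), that it is live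
  have he := hat.entry
  v_entry he
  obtain ⟨hp, _, howns⟩ := hat.pre
  have hbase := hp.base
  have hok := hat.inv.heap
  have hain := howns.inside hok (o := (x.arr, 24 * x.cap)) List.mem_cons_self
  simp only at hain
  rw [hbase] at hain
  obtain ⟨wa1, -, -, -, wa2⟩ := hain
  -- the counted blocks (kept whole for the hubs), `length ≤ cap`
  have hexts0 := hexts
  obtain ⟨-, -, hlencap, hblk⟩ := hexts
  -- the present state, in the walker's names; the registers as EQUATIONS (`Head` states them as numbers)
  have w_rip := hat.rip
  have c_rsp : v.reg .rsp = e.reg .rsp - 56 := hat.rsp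
  have w_eq : Mem.EqOn ProgX.Base.L.textLo ProgX.Base.L.textHi u₀.mem v.mem := ProgX.Base.conv_code_eqOn hat.code
  have hdf : v.flags .df = false := (show abiInv _ from hat.abi).1
  have hmx : v.mxcsr &&& 0x1F80 = 0x1F80 := (show abiInv _ from hat.abi).2
  have hsse := ProgX.Base.sseOK_of_abiInv hat.abi
  have w_kept : RegsKept [.rsp] v v := RegsKept.refl _ _
  obtain ⟨i, h_i⟩ : ∃ i, (v.reg .r12).toNat = i := ⟨_, rfl⟩
  rw [h_i] at h_r12 hk
  have c_r12 : v.reg .r12 = UInt64.ofNat i := Word.eq_ofNat_of_toNat h_i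
  have c_r15 : v.reg .r15 = UInt64.ofNat x.arr := Word.eq_ofNat_of_toNat h_r15
  have c_r14 : v.reg .r14 = UInt64.ofNat x.blocks.length := Word.eq_ofNat_of_toNat h_r14
  have hi31 : i < 2 ^ 31 := by omega
  have hlen31 : x.blocks.length < 2 ^ 31 := by omega
  have hbytes := h_bytes H rest frames
  have hla : LiveIn (H.liveObjs ++ rest) frames x.arr (24 * x.cap) :=
    howns.liveIn (o := (x.arr, 24 * x.cap)) List.mem_cons_self rest frames (Nat.le_refl _) (Nat.le_refl _)
  -- 2. WALK 1 (0x10568d, gif_driver.c:136): `cnt32_sext`: `movsxd rax, r12d` is `UInt64.ofNat i`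
  u_walk hcode [hμ.vendor, Gif.Spec.cnt32_sext i hi31]
    until [Gif.L.digest_extensions.at_10568d, Gif.L.digest_extensions.at_1056f0]
    span [ProgX.Base.L.textLo, ProgX.Base.L.textHi] side (v_side)
  case check_1056a1 =>
    -- 0x1056a1, gif_driver.c:137: the check of the load `blocks[i].Function`: inside the array `(x.arr, 24 · x.cap)`
    have hlt : i < x.blocks.length := by
      rw [Gif.Spec.cnt32_part_toInt i hi31, Gif.Spec.cnt32_part_toInt _ hlen31] at hbr_105690
      omega
    have hun : ShadowUntouched v.mem s_1056a1.mem := by v_untouched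
    exact hla.accSmall hat.inv.shadow hun _ 4 (by decide) (by u_omega) (by u_omega)
  case call_inv =>
    v_inv
  case pre_1056ac =>
    trivial
  · -- 0x1056f0 (gif_driver.c:144): `i ≥ count`, THE EXIT: `Done`; nothing was stored
    have hun : ShadowUntouched v.mem s_105690.mem := by v_untouched
    have hsame : Mem.SameExcept [⟨(e.reg .rsp).toNat - 128, (e.reg .rsp).toNat - 48⟩] v.mem s_105690.mem := by
      rw [w_mem]
      exact Mem.SameExcept.refl _ _
    have habi : (conv u₀).inv s_105690 := by v_inv
    have hat' := hat.carry (cut' := Gif.L.digest_extensions.at_1056f0) w_rip w_rsp (ProgX.Base.conv_code_in w_eq) habi hun hsame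
    exact ReachVia.done (Or.inr ⟨hat'⟩)
  · -- 3. 0x1056b1 (gif_driver.c:137): THE FIRST digest_int HAS RETURNED: it wrote 16 bytes of stack below the pushed return address.
    -- HUB 1: `At` and the counted blocks at the returned state; the two fields the round still loads, as facts in the walker's form
    have hlt : i < x.blocks.length := by
      rw [Gif.Spec.cnt32_part_toInt i hi31, Gif.Spec.cnt32_part_toInt _ hlen31] at hbr_105690
      omega
    v_after_call w_rsp_1056ac w_mem_1056ac
    have hsame1 : Mem.SameExcept [⟨(e.reg .rsp).toNat - 128, (e.reg .rsp).toNat - 48⟩] v.mem s_1056acr.mem := by u_same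
    have hun1 : ShadowUntouched v.mem s_1056acr.mem := by v_untouched
    have hat1 := hat.carry (cut' := Gif.L.digest_extensions.ret3) w_rip w_rsp w_code w_inv hun1 hsame1
    have hexts1 := Gif.Spec.digest_extensions_2.seg2_exts_carry hexts0 hsame1 (by omega) (by omega)
    obtain ⟨hlen1, hbytes1, hb1, hb255⟩ := hexts1.2.2.2 i hlt
    simp only [gfield] at hlen1 hbytes1
    rw [Gif.Spec.word_times24 x.arr i hi31 (by omega)] at w_rbp
    have l_len : s_1056acr.mem.readLE (UInt64.ofNat (x.arr + 24 * i)) 4 = x.blocks[i].len := by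
      rw [rd_eq_readLE _ _ (x.arr + 24 * i) 4 (by u_omega)]
      exact hlen1
    have l_bytes : s_1056acr.mem.readLE (UInt64.ofNat (x.arr + 24 * i) + 8) 8 = x.blocks[i].bytes := by
      rw [rd_eq_readLE _ _ (x.arr + 24 * i + 8) 8 (by u_omega)]
      exact hbytes1
    clear w_same w_post
    u_walk hcode [hμ.vendor]
      until [Gif.L.digest_extensions.at_10568d, Gif.L.digest_extensions.at_1056f0]
      span [ProgX.Base.L.textLo, ProgX.Base.L.textHi] side (v_side)
    case check_1056b7 =>
      -- 0x1056b7, gif_driver.c:138: the check of the load `blocks[i].ByteCount`: inside the array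
      have hun : ShadowUntouched s_1056acr.mem s_1056b7.mem := by v_untouched
      exact hla.accSmall hat1.inv.shadow hun _ 4 (by decide) (by u_omega) (by u_omega)
    case call_inv =>
      v_inv
    case pre_1056c6 =>
      trivial
    -- 4. 0x1056cb (gif_driver.c:138): THE SECOND digest_int HAS RETURNED. HUB 2; `r13d = len` as a number (`movsxd rdx, r13d`: `cnt32_sext`)
    v_after_call w_rsp_1056c6 w_mem_1056c6
    have hsame2 : Mem.SameExcept [⟨(e.reg .rsp).toNat - 128, (e.reg .rsp).toNat - 48⟩] s_1056acr.mem s_1056c6r.mem := by u_same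
    have hun2 : ShadowUntouched s_1056acr.mem s_1056c6r.mem := by v_untouched
    have hat2 := hat1.carry (cut' := Gif.L.digest_extensions.ret5) w_rip w_rsp w_code w_inv hun2 hsame2
    have hexts2 := Gif.Spec.digest_extensions_2.seg2_exts_carry hexts1 hsame2 (by omega) (by omega)
    obtain ⟨-, hbytes2, -, -⟩ := hexts2.2.2.2 i hlt
    simp only [gfield] at hbytes2
    have l_bytes2 : s_1056c6r.mem.readLE (UInt64.ofNat (x.arr + 24 * i) + 8) 8 = x.blocks[i].bytes := by
      rw [rd_eq_readLE _ _ (x.arr + 24 * i + 8) 8 (by u_omega)]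
      exact hbytes2
    rw [Gif.Spec.cnt32_ofBV _ (by omega)] at w_r13
    clear w_same w_post
    u_walk hcode [hμ.vendor, Gif.Spec.cnt32_sext x.blocks[i].len (by omega)]
      until [Gif.L.digest_extensions.at_10568d, Gif.L.digest_extensions.at_1056f0]
      span [ProgX.Base.L.textLo, ProgX.Base.L.textHi] side (v_side)
    case check_1056d2 =>
      -- 0x1056d2, gif_driver.c:139: the check of the load `blocks[i].Bytes`: inside the array
      have hun : ShadowUntouched s_1056c6r.mem s_1056d2.mem := by v_untouched
      exact hla.accSmall hat2.inv.shadow hun _ 8 (by decide) (by u_omega) (by u_omega)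
    case call_inv =>
      v_inv
    case pre_1056e6 =>
      -- 0x1056e6, gif_driver.c:140: digest_bytes's precondition: the heap over the pushed return address; `Bytes` is not NULL: the
      -- `len` bytes are the owned object `(bytes, len)`
      have hne : x.blocks[i].bytes ≠ 0 := by
        intro h0
        apply hbr_1056de
        rw [h0]
        rfl
      have hmem : (x.blocks[i].bytes, x.blocks[i].len) ∈ Exts.objs (some x) := by
        refine List.mem_cons_of_mem _ (List.mem_flatMap.mpr ⟨x.blocks[i], List.getElem_mem _, ?_⟩)
        unfold Blk.objs
        rw [if_neg hne]
        exact List.mem_singleton.mpr rfl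
      have hbin := howns.inside hok hmem
      simp only at hbin
      have hb2 := hbin.2.2.2.2
      refine ⟨?_, Or.inr ?_⟩
      · have hs : Mem.SameExcept [⟨(e.reg .rsp).toNat - 64, (e.reg .rsp).toNat - 56⟩] s_1056c6r.mem s_1056e6.mem := by
          rw [w_mem]
          u_same
        refine HeapPre.at_call hp (SameRegion.refl H) hat2.inv hs (by omega) ?_ ?_ ?_
        · rw [w_rsp]
          u_omega
        · rw [w_rsp]
          u_omega
        · rw [w_rsp]
          u_omega
      · rw [w_rsi, w_rdx, toNat_ofNat_addr _ (by omega), toNat_ofNat_addr _ (by omega)]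
        exact howns.liveIn hmem rest frames (Nat.le_refl _) (Nat.le_refl _)
    · -- 0x105689 → 0x10568d (gif_driver.c:139, 136): `Bytes == NULL` (design F-2, X3): nothing; `i++`: BACK AT THE HEAD
      have hun : ShadowUntouched s_1056c6r.mem s_105689.mem := by v_untouched
      have hsame : Mem.SameExcept [⟨(e.reg .rsp).toNat - 128, (e.reg .rsp).toNat - 48⟩] s_1056c6r.mem s_105689.mem := by
        rw [w_mem]
        u_same
      have habi : (conv u₀).inv s_105689 := by v_inv
      have hat' := hat2.carry (cut' := Gif.L.digest_extensions.at_10568d) w_rip w_rsp (ProgX.Base.conv_code_in w_eq) habi hun hsame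
      have hexts' := Gif.Spec.digest_extensions_2.seg2_exts_carry hexts2 hsame (by omega) (by omega)
      refine ReachVia.done (Or.inl ?_)
      refine Gif.Spec.digest_extensions_2.seg2_head_back hat' hexts' ?_ ?_ w_r12 (by omega) hlen31 hlt hk
      · rw [w_kept.get .r15 rfl]
        exact c_r15
      · rw [w_kept.get .r14 rfl]
        exact c_r14
    · -- 5. 0x1056eb (gif_driver.c:140): digest_bytes HAS RETURNED (64 bytes of stack below the pushed return address). HUB 3
      v_after_call w_rsp_1056e6 w_mem_1056e6
      have hsame3 : Mem.SameExcept [⟨(e.reg .rsp).toNat - 128, (e.reg .rsp).toNat - 48⟩] s_1056c6r.mem s_1056e6r.mem := by u_same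
      have hun3 : ShadowUntouched s_1056c6r.mem s_1056e6r.mem := by v_untouched
      have hat3 := hat2.carry (cut' := Gif.L.digest_extensions.ret7) w_rip w_rsp w_code w_inv hun3 hsame3
      have hexts3 := Gif.Spec.digest_extensions_2.seg2_exts_carry hexts2 hsame3 (by omega) (by omega)
      clear w_same w_post
      u_walk hcode [hμ.vendor]
        until [Gif.L.digest_extensions.at_10568d, Gif.L.digest_extensions.at_1056f0]
        span [ProgX.Base.L.textLo, ProgX.Base.L.textHi] side (v_side)
      -- 0x1056eb → 0x10568d (gif_driver.c:140, 136): `h = rax`, `i++`: BACK AT THE HEAD; nothing was stored since the return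
      have hun : ShadowUntouched s_1056e6r.mem s_105689.mem := by v_untouched
      have hsame : Mem.SameExcept [⟨(e.reg .rsp).toNat - 128, (e.reg .rsp).toNat - 48⟩] s_1056e6r.mem s_105689.mem := by
        rw [w_mem]
        exact Mem.SameExcept.refl _ _
      have habi : (conv u₀).inv s_105689 := by v_inv
      have hat' := hat3.carry (cut' := Gif.L.digest_extensions.at_10568d) w_rip w_rsp (ProgX.Base.conv_code_in w_eq) habi hun hsame
      have hexts' : ExtsAt (some x) x.arr x.blocks.length s_105689.mem := by
        rw [w_mem]
        exact hexts3
      refine ReachVia.done (Or.inl ?_)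
      refine Gif.Spec.digest_extensions_2.seg2_head_back hat' hexts' ?_ ?_ w_r12 (by omega) hlen31 hlt hk
      · rw [w_kept.get .r15 rfl]
        exact c_r15
      · rw [w_kept.get .r14 rfl]
        exact c_r14
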